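-- pv_equiv track=rewrite | github.com/melissareboucas/Collab | python/poor_code.py | locateTopEven
-- ===== SOURCE A (Python) =====
-- def locateTopEven(arr):
--     topEven = 0
--     indexOfTopEven = 0
--     for i in range(0, len(arr)):
--         n = arr[i]
--         if n > topEven and n % 2 == 0:
--             topEven = n
--             indexOfTopEven = i
--     return indexOfTopEven
-- ===== SOURCE B (Python) =====
-- def locateTopEven(arr):
--     candidates = [(v, i) for i, v in enumerate(arr) if v > 0 and v % 2 == 0]
--     if not candidates:
--         return 0
--     return max(candidates, key=lambda t: t[0])[1]
-- ===== Notes on version B (the rewrite author's own statement) =====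
-- stated objective: idiomatic
-- what changed: Replaces the running best/index state loop by a filter comprehension of (value, index) candidates followed by a single max(key=value) call (first-maximal tie-break), defaulting to 0 when no positive even element exists.
import Mathlib
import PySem

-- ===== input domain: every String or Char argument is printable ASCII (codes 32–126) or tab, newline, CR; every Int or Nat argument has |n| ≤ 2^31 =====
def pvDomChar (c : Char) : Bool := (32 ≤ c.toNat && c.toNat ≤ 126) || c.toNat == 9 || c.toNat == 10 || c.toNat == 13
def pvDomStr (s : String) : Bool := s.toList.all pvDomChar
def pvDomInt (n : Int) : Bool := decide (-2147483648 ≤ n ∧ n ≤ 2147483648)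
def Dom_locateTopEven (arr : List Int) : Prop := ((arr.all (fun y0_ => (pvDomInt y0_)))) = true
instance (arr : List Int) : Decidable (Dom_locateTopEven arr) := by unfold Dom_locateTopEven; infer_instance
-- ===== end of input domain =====

-- B replaces A's running best/index loop by a filtered candidate list plus one max(key) call (idiomatic; same cost).

-- ===== PORT A =====
def locateTopEven (arr : List Int) : Int :=
  let r := (PySem.List.pyRange 0 (PySem.List.len arr) 1).foldl
    (fun (st : Int × Int) i =>
      let n := PySem.List.pyGetD arr i 0
      if n > st.1 ∧ PySem.Int.mod n 2 = 0 then (n, i) else st) (0, 0)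
  r.2

-- ===== PORT B =====
def locateTopEven_alt (arr : List Int) : Int :=
  let candidates := ((PySem.List.enumerate arr 0).filter
      (fun p => decide (p.2 > 0 ∧ PySem.Int.mod p.2 2 = 0))).map (fun p => (p.2, p.1))
  match PySem.List.max? candidates (fun t => t.1) with
  | none => 0
  | some m => m.2

-- ===== PRECONDITION & SPEC =====
def Spec_locateTopEven (arr : List Int) (out : Int) : Prop := out = locateTopEven_alt arr
instance (arr : List Int) (out : Int) : Decidable (Spec_locateTopEven arr out) := by unfold Spec_locateTopEven; infer_instance

-- ===== CLAIM (what is proved, stated in full; the proofs are below) =====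
def Claim_equal_locateTopEven : Prop := ∀ (arr : List Int), Dom_locateTopEven arr → Spec_locateTopEven arr (locateTopEven arr)

-- ===== LEMMAS AND PROOFS =====

-- A's loop body, on an (index, value) pair
def pvStepA (st : Int × Int) (p : Int × Int) : Int × Int :=
  if p.2 > st.1 ∧ PySem.Int.mod p.2 2 = 0 then (p.2, p.1) else st

-- the max?-fold step (matches the unfolding of PySem.List.max? at key = .1)
def pvStepM (acc : Option (Int × Int)) (x : Int × Int) : Option (Int × Int) :=
  match acc with
  | none => some x
  | some m => if m.1 < x.1 then some x else some m

def pvPred (p : Int × Int) : Bool := decide (p.2 > 0 ∧ PySem.Int.mod p.2 2 = 0)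

-- invariant tying A's state to B's max?-accumulator
def pvInv (st : Int × Int) (acc : Option (Int × Int)) : Prop :=
  (acc = none ∧ st = (0, 0)) ∨ (acc = some (st.1, st.2) ∧ 0 < st.1)

theorem pvInv_fold (l : List (Int × Int)) (st : Int × Int) (acc : Option (Int × Int))
    (h : pvInv st acc) :
    pvInv (l.foldl pvStepA st) (((l.filter pvPred).map (fun p => (p.2, p.1))).foldl pvStepM acc) := by
  induction l generalizing st acc with
  | nil => simpa using h
  | cons p t ih =>
    simp only [List.foldl_cons, List.filter_cons]
    by_cases hp : pvPred p = true
    · simp only [hp, if_pos, List.map_cons, List.foldl_cons]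
      have hp' : 0 < p.2 ∧ PySem.Int.mod p.2 2 = 0 := by
        simpa [pvPred] using hp
      rcases h with ⟨ha, hs⟩ | ⟨ha, hpos⟩
      · subst hs
        apply ih
        simp only [ha, pvStepA, pvStepM]
        rw [if_pos (by exact ⟨hp'.1, hp'.2⟩)]
        exact Or.inr ⟨rfl, hp'.1⟩
      · subst ha
        apply ih
        by_cases hlt : st.1 < p.2
        · simp only [pvStepA, pvStepM]
          rw [if_pos (by exact ⟨hlt, hp'.2⟩), if_pos hlt]
          exact Or.inr ⟨rfl, hp'.1⟩
        · simp only [pvStepA, pvStepM]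
          rw [if_neg (by rintro ⟨h1, _⟩; exact hlt h1), if_neg hlt]
          exact Or.inr ⟨rfl, hpos⟩
    · simp only [hp, if_neg, Bool.false_eq_true, not_false_iff]
      apply ih
      have hp' : ¬ (0 < p.2 ∧ PySem.Int.mod p.2 2 = 0) := by
        simpa [pvPred] using hp
      rcases h with ⟨ha, hs⟩ | ⟨ha, hpos⟩
      · subst hs
        simp only [pvStepA]
        rw [if_neg (by simpa using hp')]
        exact Or.inl ⟨ha, rfl⟩
      · subst ha
        simp only [pvStepA]
        rw [if_neg (by rintro ⟨h1, h2⟩; exact hp' ⟨lt_trans hpos h1, h2⟩)]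
        exact Or.inr ⟨rfl, hpos⟩

theorem pvMax?_eq_foldl (l : List (Int × Int)) :
    PySem.List.max? l (fun t => t.1) = l.foldl pvStepM none := by
  simp only [PySem.List.max?]
  congr 1
  funext acc x
  cases acc <;> rfl

theorem locateTopEven_eq_enum_fold (arr : List Int) :
    locateTopEven arr = ((PySem.List.enumerate arr 0).foldl pvStepA (0, 0)).2 := by
  unfold locateTopEven
  rw [PySem.List.enumerate_eq_map_pyRange arr 0, List.foldl_map]
  rfl

-- ===== VERDICT (by name: the statement is the Claim_ definition above) =====
theorem locateTopEven_spec : Claim_equal_locateTopEven := by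
  intro arr _
  unfold Spec_locateTopEven locateTopEven_alt
  rw [locateTopEven_eq_enum_fold]
  have h := pvInv_fold (PySem.List.enumerate arr 0) (0, 0) none (Or.inl ⟨rfl, rfl⟩)
  simp only [pvMax?_eq_foldl]
  rcases h with ⟨ha, hs⟩ | ⟨ha, _⟩
  · rw [show ((PySem.List.enumerate arr 0).filter pvPred).map (fun p => (p.2, p.1)) =
        ((PySem.List.enumerate arr 0).filter
          (fun p => decide (p.2 > 0 ∧ PySem.Int.mod p.2 2 = 0))).map (fun p => (p.2, p.1)) from rfl] at ha
    rw [ha, hs]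
  · rw [show ((PySem.List.enumerate arr 0).filter pvPred).map (fun p => (p.2, p.1)) =
        ((PySem.List.enumerate arr 0).filter
          (fun p => decide (p.2 > 0 ∧ PySem.Int.mod p.2 2 = 0))).map (fun p => (p.2, p.1)) from rfl] at ha
    rw [ha]
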